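-- pv_equiv track=rewrite | github.com/bbbart/advent_of_code | 2024/day_19/answer.py | p2
-- ===== SOURCE A (Python) =====
-- from collections import defaultdict
--
-- def p2(data: list[str], is_sample: bool):
--     towels = set(data[0].split(", "))
--     patterns = set(data[2:])
--
--     total = 0
--     for pattern in patterns:
--         # we're not generating the arrangements here, just counting how many
--         # there are
--         n = len(pattern)
--         arrangements = defaultdict(int)
--         arrangements[0] = 1
--
--         for i in range(1, n + 1):
--             for j in range(i):
--                 if pattern[j:i] in towels:
--                     arrangements[i] += arrangements[j]
--
--         total += arrangements[n]
--
--     return total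
-- ===== SOURCE B (Python) =====
-- def p2(data: list[str], is_sample: bool):
--     towels = set(data[0].split(", "))
--     max_len = max(map(len, towels))
--
--     total = 0
--     for pattern in set(data[2:]):
--         dp = [1]
--         for i in range(1, len(pattern) + 1):
--             lo = i - max_len if i > max_len else 0
--             acc = 0
--             for j in range(lo, i):
--                 if pattern[j:i] in towels:
--                     acc += dp[j]
--             dp.append(acc)
--         total += dp[len(pattern)]
--     return total
-- ===== Notes on version B (the rewrite author's own statement) =====
-- stated objective: faster
-- what changed: Per pattern, B replaces A's defaultdict DP whose inner loop scans every split point j in [0, i) by a list-based DP that precomputes the maximum towel length L and scans only the window j in [i-L, i), since no longer slice can be a towel.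
import Mathlib
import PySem

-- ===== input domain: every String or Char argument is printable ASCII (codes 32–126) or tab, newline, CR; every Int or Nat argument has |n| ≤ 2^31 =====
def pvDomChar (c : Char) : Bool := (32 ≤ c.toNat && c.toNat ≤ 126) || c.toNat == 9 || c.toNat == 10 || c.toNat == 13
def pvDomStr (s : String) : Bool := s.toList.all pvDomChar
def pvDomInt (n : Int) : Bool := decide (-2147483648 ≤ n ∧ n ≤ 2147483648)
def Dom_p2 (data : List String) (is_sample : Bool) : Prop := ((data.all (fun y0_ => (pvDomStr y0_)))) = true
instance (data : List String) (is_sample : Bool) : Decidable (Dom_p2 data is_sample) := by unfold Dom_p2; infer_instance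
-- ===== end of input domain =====

-- B replaces A's full O(n²)-per-pattern inner scan (defaultdict over all split points) by a
-- list-based DP whose inner loop only scans the window of the last max-towel-length positions.

-- ===== PORT A =====
-- per-pattern count: n = len(pattern); arrangements = defaultdict(int); arrangements[0] = 1;
-- for i in range(1, n+1): for j in range(i): if pattern[j:i] in towels: arrangements[i] += arrangements[j]
def p2CountA (towels : PySem.Set String) (pattern : String) : Int :=
  let n : Int := PySem.Str.len pattern
  let arrangements : PySem.Dict Int Int := (PySem.Dict.empty).insert 0 1
  let arrangements := (PySem.List.pyRange 1 (n + 1)).foldl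
    (fun d i => (PySem.List.pyRange 0 i).foldl
      (fun d j =>
        if PySem.Set.contains towels (PySem.Str.slice pattern (some j) (some i)) then
          d.insert i (d.getD i 0 + d.getD j 0)
        else d) d) arrangements
  arrangements.getD n 0

def p2 (data : List String) (is_sample : Bool) : Int :=
  let towels : PySem.Set String :=
    PySem.Set.ofList ((PySem.Str.split? (PySem.List.pyGetD data 0 "") ", ").getD [])
  let patterns : PySem.Set String := PySem.Set.ofList (PySem.List.slice data (some 2) none)
  patterns.foldl (fun total pattern => total + p2CountA towels pattern) 0

-- ===== PORT B =====
-- dp = [1]; for i in 1..n: lo = i-max_len if i > max_len else 0; acc = sum over j in lo..i-1; dp.append(acc)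
def p2CountB (towels : PySem.Set String) (maxLen : Int) (pattern : String) : Int :=
  let dp : List Int := (PySem.List.pyRange 1 (PySem.Str.len pattern + 1)).foldl
    (fun dp i =>
      let lo : Int := if i > maxLen then i - maxLen else 0
      let acc : Int := (PySem.List.pyRange lo i).foldl
        (fun acc j =>
          if PySem.Set.contains towels (PySem.Str.slice pattern (some j) (some i)) then
            acc + PySem.List.pyGetD dp j 0
          else acc) 0
      dp ++ [acc]) [1]
  PySem.List.pyGetD dp (PySem.Str.len pattern) 0

def p2_alt (data : List String) (is_sample : Bool) : Int :=
  let towels : PySem.Set String :=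
    PySem.Set.ofList ((PySem.Str.split? (PySem.List.pyGetD data 0 "") ", ").getD [])
  let maxLen : Int := (PySem.List.max? (towels.map PySem.Str.len) (fun x => x)).getD 0
  (PySem.Set.ofList (PySem.List.slice data (some 2) none)).foldl
    (fun total pattern => total + p2CountB towels maxLen pattern) 0

-- ===== PRECONDITION & SPEC =====
-- Python A raises IndexError on data = [] (data[0]); nothing else raises.
def Pre_p2 (data : List String) (is_sample : Bool) : Prop := data ≠ []
instance (data : List String) (is_sample : Bool) : Decidable (Pre_p2 data is_sample) := by
  unfold Pre_p2; infer_instance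

def pvWitness_p2 : List String × Bool := (["r, g", "", "rg"], false)

def Spec_p2 (data : List String) (is_sample : Bool) (out : Int) : Prop := out = p2_alt data is_sample
instance (data : List String) (is_sample : Bool) (out : Int) : Decidable (Spec_p2 data is_sample out) := by
  unfold Spec_p2; infer_instance

-- ===== CLAIM (what is proved, stated in full; the proofs are below) =====
def Claim_equal_p2 : Prop := ∀ (data : List String) (is_sample : Bool), Dom_p2 data is_sample → Pre_p2 data is_sample → Spec_p2 data is_sample (p2 data is_sample)

-- ===== LEMMAS AND PROOFS =====

-- the relation between A's dict and B's dp list after the i-loops have processed 1, …, a-1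
def pvRel (a : Int) (d : PySem.Dict Int Int) (dp : List Int) : Prop :=
  (dp.length : Int) = a ∧
  (∀ j : Int, 0 ≤ j → j < a → d.getD j 0 = PySem.List.pyGetD dp j 0) ∧
  (∀ j : Int, a ≤ j → d.getD j 0 = 0)

-- a towel slice longer than every towel is never in the towel set
theorem pv_cond_false (towels : PySem.Set String) (maxLen : Int) (pattern : String)
    (hK : ∀ t ∈ towels, PySem.Str.len t ≤ maxLen)
    (i j : Int) (h0 : 0 ≤ j) (hji : j < i) (hin : i ≤ PySem.Str.len pattern)
    (hlong : maxLen < i - j) :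
    PySem.Set.contains towels (PySem.Str.slice pattern (some j) (some i)) = false := by
  by_contra h
  have hmem : PySem.Str.slice pattern (some j) (some i) ∈ towels := by
    rw [← PySem.Set.contains_iff]
    simpa using h
  have hlen := hK _ hmem
  rw [PySem.Str.len_eq] at hlen hin
  rw [PySem.Str.toList_slice, PySem.Chars.slice_eq_listSlice] at hlen
  rw [PySem.List.length_slice] at hlen
  have hci : PySem.List.clampIdx pattern.toList.length i = i.toNat := by
    have : i = ((i.toNat : Nat) : Int) := by omega
    rw [this, PySem.List.clampIdx_natCast]
    omega
  have hcj : PySem.List.clampIdx pattern.toList.length j = j.toNat := by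
    have : j = ((j.toNat : Nat) : Int) := by omega
    rw [this, PySem.List.clampIdx_natCast]
    omega
  rw [hci, hcj] at hlen
  omega
-- A's inner j-loop: the dict entry at i accumulates exactly B-shaped sums; other keys unchanged
theorem pv_innerA (towels : PySem.Set String) (pattern : String) (i : Int) :
    ∀ (js : List Int) (d : PySem.Dict Int Int), (∀ j ∈ js, j ≠ i) →
      ((js.foldl (fun d j =>
          if PySem.Set.contains towels (PySem.Str.slice pattern (some j) (some i)) then
            d.insert i (d.getD i 0 + d.getD j 0)
          else d) d).getD i 0
        = js.foldl (fun acc j =>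
            if PySem.Set.contains towels (PySem.Str.slice pattern (some j) (some i)) then
              acc + d.getD j 0
            else acc) (d.getD i 0))
      ∧ (∀ k : Int, k ≠ i →
          (js.foldl (fun d j =>
            if PySem.Set.contains towels (PySem.Str.slice pattern (some j) (some i)) then
              d.insert i (d.getD i 0 + d.getD j 0)
            else d) d).getD k 0 = d.getD k 0) := by
  intro js
  induction js with
  | nil => intro d h; exact ⟨rfl, fun k _ => rfl⟩
  | cons j js ih =>
    intro d h
    have hji : j ≠ i := h j (by simp)
    have hrest : ∀ x ∈ js, x ≠ i := fun x hx => h x (by simp [hx])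
    by_cases hc : PySem.Set.contains towels (PySem.Str.slice pattern (some j) (some i)) = true
    · set d' := d.insert i (d.getD i 0 + d.getD j 0) with hd'
      have hgi : d'.getD i 0 = d.getD i 0 + d.getD j 0 := by
        rw [hd', PySem.Dict.getD_insert]; simp
      have hgk : ∀ k : Int, k ≠ i → d'.getD k 0 = d.getD k 0 := by
        intro k hk
        rw [hd', PySem.Dict.getD_insert]; simp [hk]
      obtain ⟨ih1, ih2⟩ := ih d' hrest
      constructor
      · simp only [List.foldl_cons, hc, if_true]
        rw [← hd', ih1, hgi]
        exact PySem.List.foldl_congr_mem js _ _ _ (by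
          intro acc x hx
          rw [hgk x (hrest x hx)])
      · intro k hk
        simp only [List.foldl_cons, hc, if_true]
        rw [← hd', ih2 k hk, hgk k hk]
    · have hc' : PySem.Set.contains towels (PySem.Str.slice pattern (some j) (some i)) = false := by
        simpa using hc
      obtain ⟨ih1, ih2⟩ := ih d hrest
      exact ⟨by simp only [List.foldl_cons, hc']; exact ih1,
             fun k hk => by simp only [List.foldl_cons, hc']; exact ih2 k hk⟩
-- one step of the outer i-loop preserves pvRel
theorem pv_step (towels : PySem.Set String) (maxLen : Int) (pattern : String)
    (hK : ∀ t ∈ towels, PySem.Str.len t ≤ maxLen) (hM : 0 ≤ maxLen)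
    (a : Int) (ha : 1 ≤ a) (han : a ≤ PySem.Str.len pattern)
    (d : PySem.Dict Int Int) (dp : List Int) (hrel : pvRel a d dp) :
    pvRel (a + 1)
      ((PySem.List.pyRange 0 a).foldl
        (fun d j =>
          if PySem.Set.contains towels (PySem.Str.slice pattern (some j) (some a)) then
            d.insert a (d.getD a 0 + d.getD j 0)
          else d) d)
      (dp ++ [(PySem.List.pyRange (if a > maxLen then a - maxLen else 0) a).foldl
        (fun acc j =>
          if PySem.Set.contains towels (PySem.Str.slice pattern (some j) (some a)) then
            acc + PySem.List.pyGetD dp j 0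
          else acc) 0]) := by
  obtain ⟨hlen, hlow, hhigh⟩ := hrel
  set lo : Int := if a > maxLen then a - maxLen else 0 with hlo
  have hlo0 : 0 ≤ lo := by rw [hlo]; split <;> omega
  have hloa : lo ≤ a := by rw [hlo]; split <;> omega
  have hne : ∀ j ∈ PySem.List.pyRange 0 a, j ≠ a := by
    intro j hj
    have := PySem.List.mem_pyRange_one.1 hj
    omega
  obtain ⟨hi1, hi2⟩ := pv_innerA towels pattern a (PySem.List.pyRange 0 a) d hne
  have hdi0 : d.getD a 0 = 0 := hhigh a le_rfl
  -- the accumulated value at key a equals B's acc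
  set acc : Int := (PySem.List.pyRange lo a).foldl
      (fun acc j =>
        if PySem.Set.contains towels (PySem.Str.slice pattern (some j) (some a)) then
          acc + PySem.List.pyGetD dp j 0
        else acc) 0 with hacc
  have hsplit : PySem.List.pyRange 0 a = PySem.List.pyRange 0 lo ++ PySem.List.pyRange lo a :=
    PySem.List.pyRange_one_append 0 lo a hlo0 hloa
  have hkey : (((PySem.List.pyRange 0 a)).foldl (fun d j =>
      if PySem.Set.contains towels (PySem.Str.slice pattern (some j) (some a)) then
        d.insert a (d.getD a 0 + d.getD j 0)
      else d) d).getD a 0 = acc := by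
    rw [hi1, hdi0, hsplit, List.foldl_append]
    have hfirst : (PySem.List.pyRange 0 lo).foldl
        (fun acc j =>
          if PySem.Set.contains towels (PySem.Str.slice pattern (some j) (some a)) then
            acc + d.getD j 0
          else acc) 0 = 0 := by
      rw [PySem.List.foldl_congr_mem _ _ (fun acc _ => acc) _ ?_]
      · exact List.foldl_fixed _
      · intro acc2 j hj
        have hj' := PySem.List.mem_pyRange_one.1 hj
        have hc : PySem.Set.contains towels (PySem.Str.slice pattern (some j) (some a)) = false := by
          apply pv_cond_false towels maxLen pattern hK a j hj'.1 (by omega) han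
          rw [hlo] at hj'
          rcases hj' with ⟨hj0, hjlo⟩
          by_cases hcase : a > maxLen
          · simp [hcase] at hjlo; omega
          · simp [hcase] at hjlo; omega
        rw [hc]; simp
    rw [hfirst, hacc]
    apply PySem.List.foldl_congr_mem
    intro acc2 j hj
    have hj' := PySem.List.mem_pyRange_one.1 hj
    rw [hlow j (by omega) (by omega)]
  refine ⟨?_, ?_, ?_⟩
  · simp; omega
  · intro j hj0 hja
    by_cases hcase : j < a
    · rw [hi2 j (by omega), hlow j hj0 hcase]
      rw [PySem.List.pyGetD_eq_getElem _ _ hj0 (by omega),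
          PySem.List.pyGetD_eq_getElem _ _ hj0 (by simp; omega)]
      rw [List.getElem_append_left (by omega)]
    · have hjeq : j = a := by omega
      subst hjeq
      rw [hkey]
      rw [PySem.List.pyGetD_eq_getElem _ _ hj0 (by simp; omega)]
      have : j.toNat = dp.length := by omega
      rw [List.getElem_append_right (by omega)]
      simp [this]
  · intro j hj
    rw [hi2 j (by omega)]
    exact hhigh j (by omega)
theorem pv_loop (towels : PySem.Set String) (maxLen : Int) (pattern : String)
    (hK : ∀ t ∈ towels, PySem.Str.len t ≤ maxLen) (hM : 0 ≤ maxLen) :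
    ∀ (fuel : Nat) (a : Int) (d : PySem.Dict Int Int) (dp : List Int),
      1 ≤ a → a + fuel = PySem.Str.len pattern + 1 → pvRel a d dp →
      pvRel (PySem.Str.len pattern + 1)
        ((PySem.List.pyRange a (PySem.Str.len pattern + 1)).foldl
          (fun d i => (PySem.List.pyRange 0 i).foldl
            (fun d j =>
              if PySem.Set.contains towels (PySem.Str.slice pattern (some j) (some i)) then
                d.insert i (d.getD i 0 + d.getD j 0)
              else d) d) d)
        ((PySem.List.pyRange a (PySem.Str.len pattern + 1)).foldl
          (fun dp i =>
            let lo : Int := if i > maxLen then i - maxLen else 0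
            let acc : Int := (PySem.List.pyRange lo i).foldl
              (fun acc j =>
                if PySem.Set.contains towels (PySem.Str.slice pattern (some j) (some i)) then
                  acc + PySem.List.pyGetD dp j 0
                else acc) 0
            dp ++ [acc]) dp) := by
  intro fuel
  induction fuel with
  | zero =>
    intro a d dp ha hfa hrel
    have hnil : PySem.List.pyRange a (PySem.Str.len pattern + 1) = [] :=
      PySem.List.pyRange_one_eq_nil (by omega)
    rw [hnil]
    simp only [List.foldl_nil]
    have : a = PySem.Str.len pattern + 1 := by omega
    rwa [this] at hrel
  | succ fuel ih =>
    intro a d dp ha hfa hrel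
    have hcons : PySem.List.pyRange a (PySem.Str.len pattern + 1)
        = a :: PySem.List.pyRange (a + 1) (PySem.Str.len pattern + 1) :=
      PySem.List.pyRange_one_cons (by omega)
    rw [hcons]
    simp only [List.foldl_cons]
    exact ih (a + 1) _ _ (by omega) (by omega)
      (pv_step towels maxLen pattern hK hM a ha (by omega) d dp hrel)

theorem pv_count_eq (towels : PySem.Set String) (maxLen : Int) (pattern : String)
    (hK : ∀ t ∈ towels, PySem.Str.len t ≤ maxLen) (hM : 0 ≤ maxLen) :
    p2CountA towels pattern = p2CountB towels maxLen pattern := by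
  have hn : 0 ≤ PySem.Str.len pattern := by
    rw [PySem.Str.len_eq]; positivity
  have hrel0 : pvRel 1 ((PySem.Dict.empty).insert 0 1) [1] := by
    refine ⟨by simp, ?_, ?_⟩
    · intro j hj0 hj1
      have : j = 0 := by omega
      subst this
      decide
    · intro j hj
      rw [PySem.Dict.getD_insert]
      have : ¬ (j = 0) := by omega
      simp only [this, if_false]
      simp [PySem.Dict.getD, PySem.Dict.empty, PySem.Dict.get?]
  have hloop := pv_loop towels maxLen pattern hK hM
    (PySem.Str.len pattern).toNat 1 ((PySem.Dict.empty).insert 0 1) [1]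
    le_rfl (by omega) hrel0
  obtain ⟨hlen, hlow, hhigh⟩ := hloop
  exact hlow (PySem.Str.len pattern) hn (by omega)

theorem pv_maxLen_spec (towels : List String) :
    0 ≤ (PySem.List.max? (towels.map PySem.Str.len) (fun x => x)).getD 0 ∧
    ∀ t ∈ towels,
      PySem.Str.len t ≤ (PySem.List.max? (towels.map PySem.Str.len) (fun x => x)).getD 0 := by
  cases h : PySem.List.max? (towels.map PySem.Str.len) (fun x => x) with
  | none =>
    have : towels.map PySem.Str.len = [] := (PySem.List.max?_eq_none_iff _ _).1 h
    have ht : towels = [] := by simpa using this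
    subst ht
    simp
  | some m =>
    have hmax := PySem.List.max?_isMax h
    have hmem := PySem.List.max?_mem h
    obtain ⟨t, _, hteq⟩ := List.mem_map.1 hmem
    constructor
    · simp only [Option.getD_some]
      rw [← hteq, PySem.Str.len_eq]
      positivity
    · intro t' ht'
      simpa using hmax (PySem.Str.len t') (List.mem_map_of_mem ht')

-- ===== VERDICT (by name: the statement is the Claim_ definition above) =====
theorem p2_spec : Claim_equal_p2 := by
  intro data is_sample hdom hpre
  unfold Spec_p2
  simp only [p2, p2_alt]
  obtain ⟨hM, hK⟩ := pv_maxLen_spec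
    (PySem.Set.ofList ((PySem.Str.split? (PySem.List.pyGetD data 0 "") ", ").getD []))
  exact PySem.List.foldl_congr_mem _ _ _ _
    (fun acc x _ => by rw [pv_count_eq _ _ _ hK hM])
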